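-- pv_equiv track=rewrite | github.com/2389-research/simmer-sdk | src/simmer_sdk/reflect.py | _fix_iteration_numbering
-- ===== SOURCE A (Python) =====
-- def _fix_iteration_numbering(trajectory_md: str, expected_latest: int) -> str:
--     """Verify and fix iteration numbers in trajectory.md.
--
--     The reflect LLM sometimes mislabels iteration numbers (e.g., writes "3"
--     instead of "2"). This function checks that iteration numbers are sequential
--     (0, 1, 2, ...) and fixes the last row if it doesn't match expected_latest.
--     """
--     if not trajectory_md:
--         return trajectory_md
--
--     lines = trajectory_md.split("\n")
--     fixed_lines = []
--     data_rows_seen = 0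
--
--     for line in lines:
--         # Match table data rows (start with | followed by a number)
--         stripped = line.strip()
--         if stripped.startswith("|") and not stripped.startswith("| Iter") and not stripped.startswith("|---"):
--             cells = [c.strip() for c in stripped.split("|") if c.strip()]
--             if cells:
--                 try:
--                     row_iter = int(cells[0])
--                     # The last data row should have iteration == expected_latest
--                     # We'll fix it on the final pass below
--                     data_rows_seen += 1
--                 except (ValueError, IndexError):
--                     pass
--         fixed_lines.append(line)
--
--     # Now fix: find the last data row and ensure its iteration matches
--     for i in range(len(fixed_lines) - 1, -1, -1):
--         stripped = fixed_lines[i].strip()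
--         if stripped.startswith("|") and not stripped.startswith("| Iter") and not stripped.startswith("|---"):
--             cells = [c.strip() for c in stripped.split("|") if c.strip()]
--             if cells:
--                 try:
--                     row_iter = int(cells[0])
--                     if row_iter != expected_latest:
--                         # Fix the iteration number
--                         cells[0] = str(expected_latest)
--                         fixed_lines[i] = "| " + " | ".join(cells) + " |"
--                     break
--                 except (ValueError, IndexError):
--                     break
--
--     return "\n".join(fixed_lines)
-- ===== SOURCE B (Python) =====
-- def _fix_iteration_numbering(trajectory_md: str, expected_latest: int) -> str:
--     """Single forward pass: remember the last table data row (index + parsed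
--     cells), then patch just that one line if its iteration number is off."""
--     if not trajectory_md:
--         return trajectory_md
--
--     fixed_lines = trajectory_md.split("\n")
--     last = None  # (index, cells) of the last data row seen
--     for i, line in enumerate(fixed_lines):
--         stripped = line.strip()
--         if stripped.startswith("|") and not stripped.startswith("| Iter") and not stripped.startswith("|---"):
--             cells = [c.strip() for c in stripped.split("|") if c.strip()]
--             if cells:
--                 last = (i, cells)
--
--     if last is not None:
--         i, cells = last
--         try:
--             row_iter = int(cells[0])
--         except ValueError:
--             row_iter = None
--         if row_iter is not None and row_iter != expected_latest:
--             cells[0] = str(expected_latest)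
--             fixed_lines[i] = "| " + " | ".join(cells) + " |"
--
--     return "\n".join(fixed_lines)
-- ===== Notes on version B (the rewrite author's own statement) =====
-- stated objective: simpler
-- what changed: Replaces A's dead counting pass plus backward index scan-with-break by one forward pass that remembers the last data row's index and cells, then patches that single line after the loop.
import Mathlib
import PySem

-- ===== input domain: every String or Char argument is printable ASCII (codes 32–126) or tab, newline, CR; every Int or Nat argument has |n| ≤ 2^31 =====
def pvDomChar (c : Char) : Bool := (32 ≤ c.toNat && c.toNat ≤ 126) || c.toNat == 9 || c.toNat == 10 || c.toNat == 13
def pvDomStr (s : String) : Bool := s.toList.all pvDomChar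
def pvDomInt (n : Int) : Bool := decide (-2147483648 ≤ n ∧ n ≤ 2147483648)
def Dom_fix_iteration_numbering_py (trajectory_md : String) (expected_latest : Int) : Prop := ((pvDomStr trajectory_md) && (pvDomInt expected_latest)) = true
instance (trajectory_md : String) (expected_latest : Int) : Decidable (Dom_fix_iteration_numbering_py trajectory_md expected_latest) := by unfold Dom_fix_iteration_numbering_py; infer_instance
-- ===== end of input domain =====

-- B replaces A's dead counting pass and backward scan-with-break by one forward pass
-- remembering the last data row, then a single post-loop patch (objective: simpler).

-- shared helpers: both Pythons contain these exact expressions verbatim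
def pvIsData (stripped : String) : Bool :=
  PySem.Str.startswith stripped "|" && !PySem.Str.startswith stripped "| Iter" && !PySem.Str.startswith stripped "|---"

def pvCells (stripped : String) : List String :=
  (((PySem.Str.split? stripped "|").getD []).map PySem.Str.strip).filter (fun c => c != "")

-- ===== PORT A =====
-- second loop: for i in range(len(fixed_lines)-1, -1, -1), with its break/continue structure
def pvFixLoop (fixed : List String) (expected : Int) : Nat → List String
  | 0 => fixed
  | n+1 =>
    let stripped := PySem.Str.strip (fixed.getD n "")
    if pvIsData stripped then
      let cells := pvCells stripped
      if cells != [] then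
        match PySem.Int.ofStr? (cells.getD 0 "") with
        | some row_iter =>
          if row_iter != expected then
            fixed.set n ("| " ++ PySem.Str.join " | " (cells.set 0 (PySem.Int.toStr expected)) ++ " |")
          else fixed
        | none => fixed
      else pvFixLoop fixed expected n
    else pvFixLoop fixed expected n

def fix_iteration_numbering_py (trajectory_md : String) (expected_latest : Int) : String :=
  if trajectory_md == "" then trajectory_md
  else
    let lines := (PySem.Str.split? trajectory_md "\n").getD []
    -- first loop: builds fixed_lines and the (unused) data_rows_seen counter
    let st := lines.foldl (fun (st : List String × Int) line =>
      let stripped := PySem.Str.strip line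
      let seen :=
        if pvIsData stripped then
          let cells := pvCells stripped
          if cells != [] then
            match PySem.Int.ofStr? (cells.getD 0 "") with
            | some _ => st.2 + 1
            | none => st.2
          else st.2
        else st.2
      (st.1 ++ [line], seen)) (([] : List String), (0 : Int))
    let fixed_lines := st.1
    PySem.Str.join "\n" (pvFixLoop fixed_lines expected_latest fixed_lines.length)

-- ===== PORT B =====
def fix_iteration_numbering_py_alt (trajectory_md : String) (expected_latest : Int) : String :=
  if trajectory_md == "" then trajectory_md
  else
    let fixed_lines := (PySem.Str.split? trajectory_md "\n").getD []
    let last := (PySem.List.enumerate fixed_lines).foldl (fun acc p =>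
      let stripped := PySem.Str.strip p.2
      if pvIsData stripped then
        let cells := pvCells stripped
        if cells != [] then some (p.1, cells) else acc
      else acc) (none : Option (Int × List String))
    match last with
    | none => PySem.Str.join "\n" fixed_lines
    | some (i, cells) =>
      match PySem.Int.ofStr? (cells.getD 0 "") with
      | some row_iter =>
        if row_iter != expected_latest then
          PySem.Str.join "\n" (PySem.List.pySetD fixed_lines i
            ("| " ++ PySem.Str.join " | " (cells.set 0 (PySem.Int.toStr expected_latest)) ++ " |"))
        else PySem.Str.join "\n" fixed_lines
      | none => PySem.Str.join "\n" fixed_lines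

-- ===== PRECONDITION & SPEC =====
def Spec_fix_iteration_numbering_py (trajectory_md : String) (expected_latest : Int) (out : String) : Prop := out = fix_iteration_numbering_py_alt trajectory_md expected_latest
instance (trajectory_md : String) (expected_latest : Int) (out : String) : Decidable (Spec_fix_iteration_numbering_py trajectory_md expected_latest out) := by unfold Spec_fix_iteration_numbering_py; infer_instance

-- ===== CLAIM (what is proved, stated in full; the proofs are below) =====
def Claim_equal_fix_iteration_numbering_py : Prop := ∀ (trajectory_md : String) (expected_latest : Int), Dom_fix_iteration_numbering_py trajectory_md expected_latest → Spec_fix_iteration_numbering_py trajectory_md expected_latest (fix_iteration_numbering_py trajectory_md expected_latest)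

-- ===== LEMMAS AND PROOFS =====

-- B's loop step and post-loop patch, named for the proof
def pvStep (acc : Option (Int × List String)) (p : Int × String) : Option (Int × List String) :=
  let stripped := PySem.Str.strip p.2
  if pvIsData stripped then
    let cells := pvCells stripped
    if cells != [] then some (p.1, cells) else acc
  else acc

def pvFinish (fixed : List String) (expected : Int) : Option (Int × List String) → List String
  | none => fixed
  | some (i, cells) =>
    match PySem.Int.ofStr? (cells.getD 0 "") with
    | some row_iter =>
      if row_iter != expected then
        PySem.List.pySetD fixed i
          ("| " ++ PySem.Str.join " | " (cells.set 0 (PySem.Int.toStr expected)) ++ " |")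
      else fixed
    | none => fixed

lemma pvEnumerate_append_singleton {α : Type} (xs : List α) (x : α) (k : Int) :
    PySem.List.enumerate (xs ++ [x]) k = PySem.List.enumerate xs k ++ [(k + xs.length, x)] := by
  induction xs generalizing k with
  | nil => simp [PySem.List.enumerate]
  | cons y ys ih =>
    simp [PySem.List.enumerate, ih]
    omega

lemma pvFoldl_fst (lines : List String) (f : List String × Int → String → Int) (acc : List String) (k : Int) :
    (lines.foldl (fun st line => (st.1 ++ [line], f st line)) (acc, k)).1 = acc ++ lines := by
  induction lines generalizing acc k with
  | nil => simp
  | cons l ls ih => simp [List.foldl, ih]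

lemma pvSetD_natCast (xs : List String) (n : Nat) (h : n < xs.length) (v : String) :
    PySem.List.pySetD xs (n : Int) v = xs.set n v := by
  simp [PySem.List.pySetD, PySem.List.pySet?, PySem.List.pyIdx?, h]

lemma pvStep_eq : (fun (acc : Option (Int × List String)) (p : Int × String) =>
    let stripped := PySem.Str.strip p.2
    if pvIsData stripped then
      let cells := pvCells stripped
      if cells != [] then some (p.1, cells) else acc
    else acc) = pvStep := rfl

lemma pvMain (lines : List String) (e : Int) :
    ∀ n, n ≤ lines.length →
    pvFixLoop lines e n = pvFinish lines e ((PySem.List.enumerate (lines.take n)).foldl pvStep none) := by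
  intro n
  induction n with
  | zero => intro _; simp [pvFixLoop, pvFinish]
  | succ m ih =>
    intro h
    have hm : m < lines.length := by omega
    have htake : lines.take (m+1) = lines.take m ++ [lines[m]] := by
      simp only [List.take_add_one, List.getElem?_eq_getElem hm, Option.toList_some]
    rw [htake, pvEnumerate_append_singleton, List.foldl_append]
    have hlen : ((lines.take m).length : Int) = (m : Int) := by simp [List.length_take]; omega
    simp only [List.foldl_cons, List.foldl_nil, hlen, zero_add]
    have hget : lines.getD m "" = lines[m] := List.getD_eq_getElem lines "" hm
    show pvFixLoop lines e (m+1) = pvFinish lines e (pvStep _ ((m : Int), lines[m]))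
    by_cases hd : pvIsData (PySem.Str.strip lines[m])
    · by_cases hc : pvCells (PySem.Str.strip lines[m]) != []
      · -- this line is a data row: both sides resolve here
        simp only [pvFixLoop, pvStep, hget, hd, hc, if_true]
        simp only [pvFinish]
        cases hp : PySem.Int.ofStr? ((pvCells (PySem.Str.strip lines[m])).getD 0 "") with
        | none => rfl
        | some r => rw [pvSetD_natCast lines m hm]
      · simp only [pvFixLoop, pvStep, hget, hd, hc, if_true]
        exact ih (by omega)
    · simp only [pvFixLoop, pvStep, hget, hd]
      exact ih (by omega)

-- ===== VERDICT (by name: the statement is the Claim_ definition above) =====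
theorem fix_iteration_numbering_py_spec : Claim_equal_fix_iteration_numbering_py := by
  intro t e _
  unfold Spec_fix_iteration_numbering_py fix_iteration_numbering_py fix_iteration_numbering_py_alt
  by_cases h : t == ""
  · simp [h]
  · have h' : (t == "") = false := by simpa using h
    rw [pvStep_eq]
    simp only [h', Bool.false_eq_true, if_false]
    set lines := (PySem.Str.split? t "\n").getD [] with hl
    have hfst := pvFoldl_fst lines
      (fun st line =>
        let stripped := PySem.Str.strip line
        if pvIsData stripped then
          let cells := pvCells stripped
          if cells != [] then
            match PySem.Int.ofStr? (cells.getD 0 "") with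
            | some _ => st.2 + 1
            | none => st.2
          else st.2
        else st.2) [] 0
    simp only [List.nil_append] at hfst
    rw [hfst]
    have hmain := pvMain lines e lines.length (le_refl _)
    rw [List.take_length] at hmain
    rw [hmain]
    cases hres : List.foldl pvStep none (PySem.List.enumerate lines) with
    | none => rfl
    | some p =>
      obtain ⟨i, cells⟩ := p
      simp only [pvFinish]
      cases hp : PySem.Int.ofStr? (cells.getD 0 "") with
      | none => rfl
      | some row_iter =>
        by_cases hr : (row_iter != e) = true
        · simp only [hr, if_true]
        · simp [hr]
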